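-- pv_equiv track=rewrite | github.com/devandtravel/fragments_python | find_repeating_symbols/find_repeating_symbols.py | find_repeating_symbols
-- ===== SOURCE A (Python) =====
-- def find_repeating_symbols(string):
--     word = string.lower()
--     result_list = list(')' * len(word))
--     if len(set(word)) == len(word):
--         result = ')' * len(word)
--     else:
--         result = ''
--         for index, letter in enumerate(word):
--             for i in range(len(word) - 1):
--                 if letter == word[i] and i != index:
--                     result_list[index] = '('
--                     result_list[i] = '('
--     result = ''.join(result_list)
--     return result
-- ===== SOURCE B (Python) =====
-- def find_repeating_symbols(string):
--     word = string.lower()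
--     n = len(word)
--     result = [')'] * n
--     pairs = sorted(zip(word, range(n)), key=lambda p: p[0])
--     j = 0
--     while j < n:
--         k = j
--         while k < n and pairs[k][0] == pairs[j][0]:
--             k += 1
--         if k - j > 1:
--             for t in range(j, k):
--                 result[pairs[t][1]] = '('
--         j = k
--     return ''.join(result)
-- ===== Notes on version B (the rewrite author's own statement) =====
-- stated objective: faster
-- what changed: A rescans the whole string for every position with two nested loops and marks a close-paren result array in place; B instead sorts the (lowercased char, index) pairs once and does a single grouped pass over the sorted list, marking all indices of any group of size greater than 1.
import Mathlib
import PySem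

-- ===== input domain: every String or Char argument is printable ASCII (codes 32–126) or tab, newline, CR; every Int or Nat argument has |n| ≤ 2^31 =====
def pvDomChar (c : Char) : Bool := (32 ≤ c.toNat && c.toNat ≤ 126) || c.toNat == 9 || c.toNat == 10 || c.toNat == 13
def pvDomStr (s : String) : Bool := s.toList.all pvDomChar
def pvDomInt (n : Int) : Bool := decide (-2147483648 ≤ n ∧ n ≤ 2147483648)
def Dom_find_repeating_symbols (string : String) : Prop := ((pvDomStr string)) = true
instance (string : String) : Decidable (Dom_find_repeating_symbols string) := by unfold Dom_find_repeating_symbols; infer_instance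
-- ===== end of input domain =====

-- B replaces A's nested per-position rescans by sorting the (lowercased char, index) pairs once and one grouped marking pass; objective: faster (measured).

-- ===== PORT A =====
def find_repeating_symbols (string : String) : String :=
  let word := PySem.Chars.lower string.toList
  let result_list := List.replicate word.length ')'
  if (PySem.Set.ofList word).length == word.length then
    -- the tentative `result = ')' * len(word)` here is overwritten by the final join of result_list
    String.ofList result_list
  else
    String.ofList
      ((PySem.List.enumerate word).foldl (fun rl x =>
        (PySem.List.pyRange 0 ((word.length : Int) - 1)).foldl (fun rl i =>
          if x.2 == PySem.List.pyGetD word i ' ' && !(i == x.1) then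
            -- both indices are nonnegative and < len(word) here, so .toNat/.set are exact
            (rl.set x.1.toNat '(').set i.toNat '('
          else rl) rl) result_list)

-- ===== PORT B =====
-- pairs[k] with k always in range (k < n = pairs.length), so the default is never read
def pvPairGet (pairs : List (Char × Int)) (k : Nat) : Char × Int := pairs.getD k (' ', 0)

-- inner `while k < n and pairs[k][0] == pairs[j][0]: k += 1` of Source B
-- (fuel-indexed structural recursion; the loop advances k each step, so fuel n - k suffices)
def pvGroupEnd (pairs : List (Char × Int)) (n : Nat) (c : Char) : Nat → Nat → Nat
  | 0, k => k
  | fuel + 1, k =>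
    if k < n then
      if (pvPairGet pairs k).1 == c then pvGroupEnd pairs n c fuel (k + 1) else k
    else k

-- outer `while j < n:` of Source B (j strictly increases each iteration, so fuel n suffices)
def pvMarkLoop (pairs : List (Char × Int)) (n : Nat) : Nat → List Char → Nat → List Char
  | 0, result, _ => result
  | fuel + 1, result, j =>
    if j < n then
      let k := pvGroupEnd pairs n (pvPairGet pairs j).1 (n - j) j
      let result' :=
        if 1 < k - j then
          -- indices pairs[t][1] are nonnegative here, so .toNat/.set are exact
          (List.range' j (k - j)).foldl (fun r t => r.set (pvPairGet pairs t).2.toNat '(') result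
        else result
      pvMarkLoop pairs n fuel result' k
    else result

def find_repeating_symbols_alt (string : String) : String :=
  let word := PySem.Chars.lower string.toList
  let n := word.length
  let result := List.replicate n ')'
  let pairs := PySem.List.sorted (word.zip (PySem.List.pyRange 0 (n : Int))) (fun p => p.1)
  String.ofList (pvMarkLoop pairs n n result 0)

-- ===== PRECONDITION & SPEC =====
def Spec_find_repeating_symbols (string : String) (out : String) : Prop := out = find_repeating_symbols_alt string
instance (string : String) (out : String) : Decidable (Spec_find_repeating_symbols string out) := by unfold Spec_find_repeating_symbols; infer_instance

-- ===== CLAIM (what is proved, stated in full; the proofs are below) =====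
def Claim_equal_find_repeating_symbols : Prop := ∀ (string : String), Dom_find_repeating_symbols string → Spec_find_repeating_symbols string (find_repeating_symbols string)

-- ===== LEMMAS AND PROOFS =====

lemma pvGroupEnd_ge (pairs : List (Char × Int)) (n : Nat) (c : Char) :
    ∀ m k, k ≤ pvGroupEnd pairs n c m k := by
  intro m
  induction m with
  | zero => intro k; exact Nat.le_refl k
  | succ m ih =>
    intro k
    rw [pvGroupEnd]
    split
    · split
      · have := ih (k + 1); omega
      · omega
    · omega

lemma pvGroupEnd_gt (pairs : List (Char × Int)) (n : Nat) (j : Nat) (h : j < n) :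
    j < pvGroupEnd pairs n (pvPairGet pairs j).1 (n - j) j := by
  have hm : n - j = (n - j - 1) + 1 := by omega
  rw [hm, pvGroupEnd]
  simp only [h, if_true, beq_self_eq_true]
  have := pvGroupEnd_ge pairs n (pvPairGet pairs j).1 (n - j - 1) (j + 1)
  omega

-- a position's character repeats iff some OTHER position carries the same character
lemma pv_count_two (l : List Char) (a b : Nat) (hab : a < b) (hb : b < l.length)
    (he : l[a] = l[b]) : 1 < l.count l[b] := by
  have hsplit : l = l.take b ++ l.drop b := (List.take_append_drop b l).symm
  have hdrop : l.drop b = l[b] :: l.drop (b + 1) := List.drop_eq_getElem_cons hb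
  have hmem : l[b] ∈ l.take b := by
    have : (l.take b)[a]'(by simp [hb.le]; omega) = l[a] := List.getElem_take
    rw [← he, ← this]; exact List.getElem_mem _
  have h1 : 0 < (l.take b).count l[b] := List.count_pos_iff.mpr hmem
  have h2 : 0 < (l.drop b).count l[b] := by
    rw [hdrop, List.count_cons_self]; omega
  have key : l.count l[b] = (l.take b).count l[b] + (l.drop b).count l[b] := by
    rw [← List.count_append, List.take_append_drop]
  omega

lemma pv_count_iff (l : List Char) (p : Nat) (hp : p < l.length) :
    1 < l.count l[p] ↔ ∃ q, q < l.length ∧ q ≠ p ∧ l[q]? = l[p]? := by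
  constructor
  · intro h
    by_contra hcon
    push_neg at hcon
    have hsplit : l = l.take p ++ l.drop p := (List.take_append_drop p l).symm
    have hdrop : l.drop p = l[p] :: l.drop (p + 1) := List.drop_eq_getElem_cons hp
    have htake : (l.take p).count l[p] = 0 := by
      rw [List.count_eq_zero]
      intro hm
      obtain ⟨i, hi, hig⟩ := List.mem_iff_getElem.mp hm
      rw [List.length_take] at hi
      have hil : i < l.length := by omega
      have hv : l[i]'hil = l[p] := by rw [← hig]; exact (List.getElem_take).symm
      exact hcon i hil (by omega)
        (by rw [List.getElem?_eq_getElem hil, List.getElem?_eq_getElem hp, hv])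
    have hdrop2 : (l.drop (p + 1)).count l[p] = 0 := by
      rw [List.count_eq_zero]
      intro hm
      obtain ⟨i, hi, hig⟩ := List.mem_iff_getElem.mp hm
      rw [List.length_drop] at hi
      have hlen : p + 1 + i < l.length := by omega
      have hv : l[p + 1 + i]'hlen = l[p] := by rw [← hig]; simp
      exact hcon (p + 1 + i) hlen (by omega)
        (by rw [List.getElem?_eq_getElem hlen, List.getElem?_eq_getElem hp, hv])
    have key : l.count l[p] = (l.take p).count l[p] + (l.drop p).count l[p] := by
      rw [← List.count_append, List.take_append_drop]
    rw [htake, hdrop, List.count_cons] at key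
    simp [hdrop2] at key
    omega
  · rintro ⟨q, hq, hne, he⟩
    have heq : l[q]'hq = l[p] := by
      have := List.getElem?_eq_getElem hq
      have h2 := List.getElem?_eq_getElem hp
      rw [this, h2] at he
      exact Option.some_injective _ he
    rcases Nat.lt_or_ge q p with h | h
    · exact pv_count_two l q p h hp heq
    · have hpq : p < q := by omega
      rw [← heq]
      exact pv_count_two l p q hpq hq heq.symm

-- generic "monotone marking" fold: each step only writes '(' at its marked positions
lemma pv_mark_len {β : Type} (g : List Char → β → List Char)
    (hlen : ∀ r x, (g r x).length = r.length) (l : List β) (r : List Char) :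
    (l.foldl g r).length = r.length := by
  induction l generalizing r with
  | nil => rfl
  | cons x xs ih => simpa [List.foldl_cons, hlen] using ih (g r x)

lemma pv_mark_foldl {β : Type} (g : List Char → β → List Char) (mark : β → Nat → Bool)
    (hlen : ∀ r x, (g r x).length = r.length)
    (hget : ∀ r x p, p < r.length → (g r x)[p]? = if mark x p then some '(' else r[p]?)
    (l : List β) (r : List Char) (p : Nat) (hp : p < r.length) :
    (l.foldl g r)[p]? = if l.any (fun x => mark x p) then some '(' else r[p]? := by
  induction l generalizing r with
  | nil => simp
  | cons x xs ih =>
    rw [List.foldl_cons, ih (g r x) (by rw [hlen]; exact hp), hget r x p hp]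
    by_cases hm : mark x p <;> by_cases ha : xs.any (fun x => mark x p = true) <;>
      simp [hm, ha]

-- ===== A-side characterization =====
lemma pvA_char (word : List Char) (p : Nat) (hp : p < word.length) :
    ((PySem.List.enumerate word).foldl (fun rl x =>
        (PySem.List.pyRange 0 ((word.length : Int) - 1)).foldl (fun rl i =>
          if x.2 == PySem.List.pyGetD word i ' ' && !(i == x.1) then
            (rl.set x.1.toNat '(').set i.toNat '('
          else rl) rl) (List.replicate word.length ')'))[p]? =
    if 1 < word.count word[p] then some '(' else some ')' := by
  have hinlen : ∀ (r : List Char) (i : Int) (x : Int × Char),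
      ((if x.2 == PySem.List.pyGetD word i ' ' && !(i == x.1) then
          (r.set x.1.toNat '(').set i.toNat '(' else r)).length = r.length := by
    intro r i x; split <;> simp
  have hfold := pv_mark_foldl
    (fun rl x => (PySem.List.pyRange 0 ((word.length : Int) - 1)).foldl (fun rl i =>
      if x.2 == PySem.List.pyGetD word i ' ' && !(i == x.1) then
        (rl.set x.1.toNat '(').set i.toNat '('
      else rl) rl)
    (fun x q => (PySem.List.pyRange 0 ((word.length : Int) - 1)).any (fun i =>
      (x.2 == PySem.List.pyGetD word i ' ' && !(i == x.1)) && (x.1.toNat == q || i.toNat == q)))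
    (fun r x => pv_mark_len _ (fun r i => hinlen r i x) _ r)
    (fun r x q hq => by
      refine pv_mark_foldl _
        (fun i q => (x.2 == PySem.List.pyGetD word i ' ' && !(i == x.1)) && (x.1.toNat == q || i.toNat == q))
        (fun r i => hinlen r i x) ?_ _ r q hq
      intro r i q hq2
      by_cases hc : (x.2 == PySem.List.pyGetD word i ' ' && !(i == x.1)) = true
      · rw [if_pos hc]
        by_cases hb : i.toNat = q <;> by_cases ha : x.1.toNat = q <;>
          simp [List.getElem?_set, List.length_set, hc, ha, hb, hq2]
      · rw [if_neg hc]
        have hc' : (x.2 == PySem.List.pyGetD word i ' ' && !(i == x.1)) = false := by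
          cases hcc : (x.2 == PySem.List.pyGetD word i ' ' && !(i == x.1)) <;> simp_all
        simp [hc'])
    (PySem.List.enumerate word) (List.replicate word.length ')') p
    (by simpa using hp)
  rw [hfold, List.getElem?_replicate, if_pos hp]
  have build : ∀ a b : Nat, ∀ hab : a < b, ∀ hb : b < word.length,
      word[a]'(by omega) = word[b]'hb → (b = p ∨ a = p) →
      (PySem.List.enumerate word).any (fun x =>
        (PySem.List.pyRange 0 ((word.length : Int) - 1)).any (fun i =>
          (x.2 == PySem.List.pyGetD word i ' ' && !(i == x.1)) && (x.1.toNat == p || i.toNat == p))) = true := by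
    intro a b hab hb heq htouch
    rw [List.any_eq_true]
    refine ⟨((b : Int), word[b]'hb), (PySem.List.mem_enumerate_iff _ _ _).mpr ⟨b, hb, by simp⟩, ?_⟩
    rw [List.any_eq_true]
    refine ⟨(a : Int), PySem.List.mem_pyRange_one.mpr ⟨by omega, by push_cast; omega⟩, ?_⟩
    have hpg : PySem.List.pyGetD word (a : Int) ' ' = word[a]'(by omega) := by
      rw [PySem.List.pyGetD_eq_getElem word ' ' (by omega) (by push_cast; omega)]
      simp
    simp only [hpg, ← heq, beq_self_eq_true, Bool.true_and, Bool.and_eq_true,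
      Bool.not_eq_true', beq_eq_false_iff_ne, Bool.or_eq_true, beq_iff_eq,
      Int.toNat_natCast]
    constructor
    · intro hcon
      have : a = b := by exact_mod_cast hcon
      omega
    · omega
  have hany : (PySem.List.enumerate word).any (fun x =>
      (PySem.List.pyRange 0 ((word.length : Int) - 1)).any (fun i =>
        (x.2 == PySem.List.pyGetD word i ' ' && !(i == x.1)) && (x.1.toNat == p || i.toNat == p))) = true
      ↔ 1 < word.count word[p] := by
    constructor
    · intro h
      rw [List.any_eq_true] at h
      obtain ⟨x, hx, hin⟩ := h
      rw [List.any_eq_true] at hin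
      obtain ⟨i, hi, hcond⟩ := hin
      rw [PySem.List.mem_enumerate_iff] at hx
      obtain ⟨k, hk, rfl⟩ := hx
      rw [PySem.List.mem_pyRange_one] at hi
      obtain ⟨hi0, hi1⟩ := hi
      have hil : i < (word.length : Int) := by omega
      have hql : i.toNat < word.length := by omega
      have hpg : PySem.List.pyGetD word i ' ' = word[i.toNat]'hql :=
        PySem.List.pyGetD_eq_getElem word ' ' hi0 hil
      simp only [zero_add, hpg, Bool.and_eq_true, beq_iff_eq, Bool.not_eq_true',
        beq_eq_false_iff_ne, Bool.or_eq_true, Int.toNat_natCast] at hcond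
      obtain ⟨⟨heq, hne⟩, htouch⟩ := hcond
      have hqk : i.toNat ≠ k := by omega
      have hpair : ∀ u v : Nat, ∀ hu : u < word.length, ∀ hv : v < word.length,
          u ≠ v → word[u]'hu = word[v]'hv → v = p → 1 < word.count word[p] := by
        intro u v hu hv hne2 hee hvp
        subst hvp
        exact (pv_count_iff word v hv).mpr ⟨u, hu, hne2,
          by rw [List.getElem?_eq_getElem hu, List.getElem?_eq_getElem hv]; exact congrArg some hee⟩
      rcases htouch with hkp | hqp
      · exact hpair i.toNat k hql hk hqk heq.symm hkp
      · exact hpair k i.toNat hk hql (by omega) heq hqp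
    · intro h
      obtain ⟨q, hq, hne, he⟩ := (pv_count_iff word p hp).mp h
      have heg : word[q]'hq = word[p] := by
        rw [List.getElem?_eq_getElem hq, List.getElem?_eq_getElem hp] at he
        exact Option.some_injective _ he
      rcases Nat.lt_or_ge q p with hlt | hge
      · exact build q p hlt hp heg (Or.inl rfl)
      · exact build p q (by omega) hq heg.symm (Or.inr rfl)
  by_cases hc : 1 < word.count word[p]
  · rw [if_pos hc, if_pos (hany.mpr hc)]
  · simp [hc, (not_congr hany).mpr hc]

lemma pvA_len (word : List Char) :
    ((PySem.List.enumerate word).foldl (fun rl x =>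
        (PySem.List.pyRange 0 ((word.length : Int) - 1)).foldl (fun rl i =>
          if x.2 == PySem.List.pyGetD word i ' ' && !(i == x.1) then
            (rl.set x.1.toNat '(').set i.toNat '('
          else rl) rl) (List.replicate word.length ')')).length = word.length := by
  exact (pv_mark_len
    (fun rl x => (PySem.List.pyRange 0 ((word.length : Int) - 1)).foldl (fun rl i =>
      if x.2 == PySem.List.pyGetD word i ' ' && !(i == x.1) then
        (rl.set x.1.toNat '(').set i.toNat '('
      else rl) rl)
    (fun r x => pv_mark_len _ (fun r i => by split <;> simp) _ r)
    (PySem.List.enumerate word) (List.replicate word.length ')')).trans List.length_replicate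

-- ofList is a sublist, so equal length forces Nodup
lemma pvOfList_sublist {α : Type} [BEq α] (xs : List α) : (PySem.Set.ofList xs).Sublist xs := by
  induction xs using List.reverseRecOn with
  | nil => simp [PySem.Set.ofList_nil]
  | append_singleton xs x ih =>
    rw [PySem.Set.ofList_append_singleton]
    unfold PySem.Set.add
    split
    · exact ih.trans (List.sublist_append_left xs [x])
    · exact ih.append (List.Sublist.refl [x])

lemma pvNodup_of_ofList_length {α : Type} [BEq α] [LawfulBEq α] (xs : List α)
    (h : (PySem.Set.ofList xs).length = xs.length) : xs.Nodup := by
  have he := (pvOfList_sublist xs).eq_of_length h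
  have := PySem.Set.nodup_ofList (xs := xs)
  rwa [he] at this

-- ===== B-side characterization =====
lemma pvGroupEnd_le (pairs : List (Char × Int)) (n : Nat) (c : Char) :
    ∀ m k, k ≤ n → pvGroupEnd pairs n c m k ≤ n := by
  intro m
  induction m with
  | zero =>
    intro k hkn
    exact hkn
  | succ m ih =>
    intro k hkn
    rw [pvGroupEnd]
    split
    · split
      · exact ih (k + 1) (by omega)
      · exact hkn
    · exact hkn

lemma pvGroupEnd_all (pairs : List (Char × Int)) (n : Nat) (c : Char) :
    ∀ m k, ∀ t, k ≤ t → t < pvGroupEnd pairs n c m k → (pvPairGet pairs t).1 = c := by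
  intro m
  induction m with
  | zero =>
    intro k t ht1 ht2
    rw [pvGroupEnd] at ht2
    omega
  | succ m ih =>
    intro k t ht1 ht2
    rw [pvGroupEnd] at ht2
    by_cases hkn : k < n
    · simp only [hkn, if_true] at ht2
      by_cases hbeq : (pvPairGet pairs k).1 == c
      · rw [if_pos hbeq] at ht2
        rcases Nat.eq_or_lt_of_le ht1 with he | hlt
        · rw [he] at hbeq; exact beq_iff_eq.mp hbeq
        · exact ih (k + 1) t hlt ht2
      · rw [if_neg hbeq] at ht2; omega
    · simp [hkn] at ht2; omega

lemma pvGroupEnd_stop (pairs : List (Char × Int)) (n : Nat) (c : Char) :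
    ∀ m k, n - k ≤ m → pvGroupEnd pairs n c m k < n → (pvPairGet pairs (pvGroupEnd pairs n c m k)).1 ≠ c := by
  intro m
  induction m with
  | zero =>
    intro k hk
    rw [pvGroupEnd]
    intro h
    omega
  | succ m ih =>
    intro k hk
    rw [pvGroupEnd]
    by_cases hkn : k < n
    · simp only [hkn, if_true]
      by_cases hbeq : (pvPairGet pairs k).1 == c
      · rw [if_pos hbeq]
        exact ih (k + 1) (by omega)
      · rw [if_neg hbeq]
        intro _
        exact fun hc => hbeq (beq_iff_eq.mpr hc)
    · simp [hkn]

lemma pvMarkLoop_len (pairs : List (Char × Int)) (n m : Nat) (r : List Char) (j : Nat) :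
    (pvMarkLoop pairs n m r j).length = r.length := by
  induction m generalizing r j with
  | zero => rfl
  | succ m ih =>
    rw [pvMarkLoop]
    by_cases hjn : j < n
    · simp only [hjn, if_true]
      rw [ih]
      split
      · exact pv_mark_len _ (fun r t => List.length_set ..) _ r
      · rfl
    · simp [hjn]

-- after the loop from j, position p holds '(' iff some pair at t ∈ [j, n) points at p and its char repeats
def pvMarked (pairs : List (Char × Int)) (n j p : Nat) : Bool :=
  (List.range' j (n - j)).any (fun t =>
    (pvPairGet pairs t).2 == (p : Int) &&
      decide (1 < (pairs.map Prod.fst).count (pvPairGet pairs t).1))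

lemma pvMarkLoop_get (pairs : List (Char × Int)) (n : Nat)
    (hlen : pairs.length = n)
    (hsor : pairs.Pairwise (fun a b => a.1 ≤ b.1))
    (hsnd : ∀ t (_ : t < pairs.length), 0 ≤ pairs[t].2) :
    ∀ m j r, n - j ≤ m → j ≤ n → r.length = n →
      (∀ s (hs : s < n) (hj : j < n), s < j → pairs[s].1 ≠ (pairs[j]'(by omega)).1) →
      ∀ p, p < n →
      (pvMarkLoop pairs n m r j)[p]? = if pvMarked pairs n j p then some '(' else r[p]? := by
  have hsor' := List.pairwise_iff_getElem.mp hsor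
  intro m
  induction m with
  | zero =>
    intro j r hm hjn hr hbd p hpn
    have h0 : n - j = 0 := by omega
    simp [pvMarkLoop, pvMarked, h0]
  | succ m ih =>
    intro j r hm hjn hr hbd p hpn
    by_cases hj : j < n
    case neg =>
      rw [pvMarkLoop, if_neg hj]
      have h0 : n - j = 0 := by omega
      simp [pvMarked, h0]
    case pos =>
    have hjl : j < pairs.length := by omega
    have hgetj : pvPairGet pairs j = pairs[j]'hjl := List.getD_eq_getElem pairs (' ', 0) hjl
    set c := (pvPairGet pairs j).1 with hc
    set k := pvGroupEnd pairs n c (n - j) j with hkdef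
    have hjc : (pairs[j]'hjl).1 = c := by rw [hc, hgetj]
    have hk1 : j < k := pvGroupEnd_gt pairs n j hj
    have hk2 : k ≤ n := pvGroupEnd_le pairs n c (n - j) j (by omega)
    have hall : ∀ t, j ≤ t → t < k → (pvPairGet pairs t).1 = c :=
      fun t h1 h2 => pvGroupEnd_all pairs n c (n - j) j t h1 h2
    have hstop : k < n → (pvPairGet pairs k).1 ≠ c :=
      fun hkn => pvGroupEnd_stop pairs n c (n - j) j (by omega) hkn
    have hgetAll : ∀ t (ht : t < n), pvPairGet pairs t = pairs[t]'(by omega) :=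
      fun t ht => List.getD_eq_getElem pairs (' ', 0) (by omega)
    have hmidc : ∀ t (h1 : j ≤ t) (h2 : t < k), (pairs[t]'(by omega)).1 = c := by
      intro t h1 h2
      rw [← hgetAll t (by omega)]
      exact hall t h1 h2
    have haft : ∀ t (h1 : k ≤ t) (h2 : t < n), (pairs[t]'(by omega)).1 ≠ c := by
      intro t h1 h2 heq
      have hkn : k < n := by omega
      rcases Nat.eq_or_lt_of_le h1 with he | hlt
      · apply hstop hkn
        rw [hgetAll k hkn]
        subst he
        exact heq
      · have h1' := hsor' j k (by omega) (by omega) hk1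
        have h2' := hsor' k t (by omega) (by omega) hlt
        apply hstop hkn
        rw [hgetAll k hkn]
        apply le_antisymm
        · rw [← heq]; exact h2'
        · rw [← hjc]; exact h1'
    have hbef : ∀ s (hs : s < j), (pairs[s]'(by omega)).1 ≠ c := by
      intro s hs heq
      exact hbd s (by omega) hj hs (heq.trans hjc.symm)
    -- the marked group [j, k) is exactly the occurrences of c, so its size is c's count
    have hcnt : (pairs.map Prod.fst).count c = k - j := by
      have hdec2 : pairs.drop j = (pairs.drop j).take (k - j) ++ pairs.drop k := by
        have hjk : j + (k - j) = k := by omega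
        conv_lhs => rw [← List.take_append_drop (k - j) (pairs.drop j)]
        rw [List.drop_drop, hjk]
      have hA : ((pairs.take j).map Prod.fst).count c = 0 := by
        rw [List.count_eq_zero]
        intro hmem
        rw [List.mem_map] at hmem
        obtain ⟨x, hx, hxc⟩ := hmem
        obtain ⟨s, hs, hsg⟩ := List.mem_iff_getElem.mp hx
        rw [List.length_take] at hs
        have hsj : s < j := by omega
        refine hbef s hsj ?_
        rw [← hxc, ← hsg, List.getElem_take]
      have hBlen : ((pairs.drop j).take (k - j)).length = k - j := by
        rw [List.length_take, List.length_drop]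
        omega
      have hB : (((pairs.drop j).take (k - j)).map Prod.fst).count c = k - j := by
        have hall2 : ∀ b ∈ ((pairs.drop j).take (k - j)).map Prod.fst, c = b := by
          intro b hb
          rw [List.mem_map] at hb
          obtain ⟨x, hx, hxc⟩ := hb
          obtain ⟨i, hi, hig⟩ := List.mem_iff_getElem.mp hx
          rw [hBlen] at hi
          have hx2 : x = pairs[j + i]'(by omega) := by
            rw [← hig, List.getElem_take, List.getElem_drop]
          rw [← hxc, hx2]
          exact (hmidc (j + i) (by omega) (by omega)).symm
        rw [List.count_eq_length.mpr hall2, List.length_map, hBlen]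
      have hC : ((pairs.drop k).map Prod.fst).count c = 0 := by
        rw [List.count_eq_zero]
        intro hmem
        rw [List.mem_map] at hmem
        obtain ⟨x, hx, hxc⟩ := hmem
        obtain ⟨i, hi, hig⟩ := List.mem_iff_getElem.mp hx
        rw [List.length_drop] at hi
        refine haft (k + i) (by omega) (by omega) ?_
        rw [← hxc, ← hig, List.getElem_drop]
      conv_lhs => rw [← List.take_append_drop j pairs, hdec2]
      rw [List.map_append, List.map_append, List.count_append, List.count_append, hA, hB, hC]
      omega
    -- the conditional marking pass
    set r' := if 1 < k - j then
        (List.range' j (k - j)).foldl (fun r t => r.set (pvPairGet pairs t).2.toNat '(') r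
      else r with hr'def
    have hr'len : r'.length = n := by
      rw [hr'def]
      split
      · exact (pv_mark_len _ (fun r t => List.length_set ..) _ r).trans hr
      · exact hr
    have hr'get : ∀ q, q < n → r'[q]? =
        if (decide (1 < k - j) && (List.range' j (k - j)).any (fun t => (pvPairGet pairs t).2.toNat == q)) then
          some '(' else r[q]? := by
      intro q hq
      rw [hr'def]
      by_cases hkj : 1 < k - j
      · rw [if_pos hkj]
        rw [pv_mark_foldl _ (fun t q => (pvPairGet pairs t).2.toNat == q)
          (fun r t => List.length_set ..)
          (fun r t q hq2 => by
            by_cases hb : (pvPairGet pairs t).2.toNat = q <;>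
              simp [List.getElem?_set, hb, hq2])
          _ r q (by omega)]
        have hd : decide (1 < k - j) = true := by simp [hkj]
        rw [hd, Bool.true_and]
      · rw [if_neg hkj]
        have hd : decide (1 < k - j) = false := by simp [hkj]
        rw [hd, Bool.false_and]
        simp
    -- one unfolding of the loop
    rw [pvMarkLoop, if_pos hj]
    dsimp only
    rw [← hc, ← hkdef, ← hr'def]
    -- boundary condition at k
    have hbdk : ∀ s (hs : s < n) (hkn : k < n), s < k → pairs[s].1 ≠ (pairs[k]'(by omega)).1 := by
      intro s hs hkn hsk heq
      have hkc : (pairs[k]'(by omega)).1 ≠ c := by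
        rw [← hgetAll k hkn]; exact hstop hkn
      by_cases hsj2 : s < j
      · have h1' := hsor' s j (by omega) (by omega) hsj2
        have h2' := hsor' j k (by omega) (by omega) hk1
        have hjk : (pairs[j]'hjl).1 = (pairs[k]'(by omega)).1 :=
          le_antisymm h2' (heq ▸ h1')
        exact hkc (by rw [← hjk]; exact hjc)
      · exact hkc (by rw [← heq]; exact hmidc s (by omega) hsk)
    rw [ih k r' (by omega) (by omega) hr'len hbdk p hpn]
    -- split the marked range [j, n) at k
    have hra : List.range' j (k - j) ++ List.range' k (n - k) = List.range' j (n - j) := by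
      have h := List.range'_append (s := j) (m := k - j) (n := n - k) (step := 1)
      rw [show j + 1 * (k - j) = k by omega, show (k - j) + (n - k) = n - j by omega] at h
      exact h
    have hsplitM : pvMarked pairs n j p =
        ((List.range' j (k - j)).any (fun t =>
            (pvPairGet pairs t).2 == (p : Int) &&
              decide (1 < (pairs.map Prod.fst).count (pvPairGet pairs t).1)) ||
          pvMarked pairs n k p) := by
      unfold pvMarked
      rw [← hra, List.any_append]
    by_cases hM2 : pvMarked pairs n k p = true
    · rw [if_pos hM2, hsplitM, hM2, Bool.or_true]
      simp
    · have hM2' : pvMarked pairs n k p = false := by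
        cases h : pvMarked pairs n k p
        · rfl
        · exact absurd h hM2
      rw [if_neg hM2, hr'get p hpn, hsplitM, hM2', Bool.or_false]
      have hcond : (List.range' j (k - j)).any (fun t =>
          (pvPairGet pairs t).2 == (p : Int) &&
            decide (1 < (pairs.map Prod.fst).count (pvPairGet pairs t).1)) =
          (decide (1 < k - j) && (List.range' j (k - j)).any (fun t => (pvPairGet pairs t).2.toNat == p)) := by
        by_cases hkj : 1 < k - j
        · have hpt : ∀ t ∈ List.range' j (k - j),
              ((pvPairGet pairs t).2 == (p : Int) &&
                decide (1 < (pairs.map Prod.fst).count (pvPairGet pairs t).1)) =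
              ((pvPairGet pairs t).2.toNat == p) := by
            intro t hmem
            rw [List.mem_range'_1] at hmem
            have htk : t < k := by omega
            have htn : t < n := by omega
            rw [hall t (by omega) htk, hcnt]
            have hge0 : 0 ≤ (pvPairGet pairs t).2 := by
              rw [hgetAll t htn]; exact hsnd t (by omega)
            by_cases hb2 : (pvPairGet pairs t).2 = (p : Int)
            · have hb3 : (pvPairGet pairs t).2.toNat = p := by omega
              simp [hb2, hb3, hkj]
            · have hb3 : (pvPairGet pairs t).2.toNat ≠ p := by omega
              have l1 : ((pvPairGet pairs t).2 == (p : Int)) = false := beq_eq_false_iff_ne.mpr hb2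
              have l2 : ((pvPairGet pairs t).2.toNat == p) = false := beq_eq_false_iff_ne.mpr hb3
              rw [l1, l2, Bool.false_and]
          simp only [hkj, decide_true, Bool.true_and]
          cases hY : (List.range' j (k - j)).any (fun t => (pvPairGet pairs t).2.toNat == p)
          · rw [List.any_eq_false] at hY ⊢
            intro t hmem
            rw [hpt t hmem]
            exact hY t hmem
          · rw [List.any_eq_true] at hY ⊢
            obtain ⟨t, hmem, hmark⟩ := hY
            exact ⟨t, hmem, by rw [hpt t hmem]; exact hmark⟩
        · have hXf : (List.range' j (k - j)).any (fun t =>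
              (pvPairGet pairs t).2 == (p : Int) &&
                decide (1 < (pairs.map Prod.fst).count (pvPairGet pairs t).1)) = false := by
            rw [List.any_eq_false]
            intro t hmem
            rw [List.mem_range'_1] at hmem
            rw [hall t (by omega) (by omega), hcnt]
            simp [hkj]
          rw [hXf]
          simp [hkj]
      rw [hcond]

lemma pvB_char (word : List Char) (p : Nat) (hp : p < word.length) :
    (pvMarkLoop (PySem.List.sorted (word.zip (PySem.List.pyRange 0 (word.length : Int))) (fun p => p.1))
        word.length word.length (List.replicate word.length ')') 0)[p]? =
    if 1 < word.count word[p] then some '(' else some ')' := by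
  set L := word.zip (PySem.List.pyRange 0 (word.length : Int)) with hL
  have hLlen : L.length = word.length := by
    rw [hL, List.length_zip, PySem.List.length_pyRange_one]
    simp
  set pairs := PySem.List.sorted L (fun p => p.1) with hpairs
  have hperm : pairs.Perm L := PySem.List.sorted_perm L _ false
  have hplen : pairs.length = word.length := (hperm.length_eq).trans hLlen
  have hsor : pairs.Pairwise (fun a b => a.1 ≤ b.1) := PySem.List.sorted_pairwise L _
  have hLget : ∀ i (hi : i < word.length), L[i]'(by omega) = (word[i]'hi, (i : Int)) := by
    intro i hi
    simp only [hL]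
    simp [List.getElem_zip, PySem.List.getElem_pyRange_one]
  have helem : ∀ t (ht : t < pairs.length), ∃ q, ∃ hq : q < word.length,
      pairs[t] = (word[q]'hq, (q : Int)) := by
    intro t ht
    have hmem : pairs[t] ∈ L := hperm.mem_iff.mp (List.getElem_mem ht)
    obtain ⟨q, hq, hqg⟩ := List.mem_iff_getElem.mp hmem
    exact ⟨q, by omega, by rw [← hqg, hLget q (by omega)]⟩
  have hsnd : ∀ t (ht : t < pairs.length), 0 ≤ pairs[t].2 := by
    intro t ht
    obtain ⟨q, hq, he⟩ := helem t ht
    rw [he]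
    simp
  have hmain := pvMarkLoop_get pairs word.length hplen hsor hsnd word.length 0
    (List.replicate word.length ')') (by omega) (by omega) (by simp)
    (fun s hs hj h => absurd h (Nat.not_lt_zero s)) p hp
  rw [hmain, List.getElem?_replicate, if_pos hp]
  have hcnteq : ∀ c, (pairs.map Prod.fst).count c = word.count c := by
    intro c
    have h1 : (pairs.map Prod.fst).Perm (L.map Prod.fst) := hperm.map _
    have h2 : L.map Prod.fst = word := by
      rw [hL]
      apply List.map_fst_zip
      rw [PySem.List.length_pyRange_one]
      simp
    rw [h1.count_eq, h2]
  have hiff : pvMarked pairs word.length 0 p = true ↔ 1 < word.count word[p] := by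
    unfold pvMarked
    rw [List.any_eq_true]
    constructor
    · rintro ⟨t, hmem, hcond⟩
      rw [List.mem_range'_1] at hmem
      have ht : t < pairs.length := by omega
      obtain ⟨q, hq, he⟩ := helem t ht
      rw [show pvPairGet pairs t = pairs[t]'ht from List.getD_eq_getElem pairs (' ', 0) ht, he] at hcond
      dsimp only at hcond
      simp only [Bool.and_eq_true, beq_iff_eq, decide_eq_true_eq] at hcond
      obtain ⟨hsndp, hcnt⟩ := hcond
      have hsndp' : (q : Int) = (p : Int) := hsndp
      have hqp : q = p := by exact_mod_cast hsndp' 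
      rw [hcnteq] at hcnt
      subst hqp
      exact hcnt
    · intro h
      have hmemL : ((p : Int)) ∈ L.map Prod.snd := by
        have h2 : L.map Prod.snd = PySem.List.pyRange 0 (word.length : Int) := by
          rw [hL]
          apply List.map_snd_zip
          rw [PySem.List.length_pyRange_one]
          simp
        rw [h2, PySem.List.mem_pyRange_one]
        constructor
        · omega
        · exact_mod_cast hp
      have hmemP : ((p : Int)) ∈ pairs.map Prod.snd := ((hperm.map Prod.snd).mem_iff).mpr hmemL
      obtain ⟨x, hx, hxs⟩ := List.mem_map.mp hmemP
      obtain ⟨t, ht, htg⟩ := List.mem_iff_getElem.mp hx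
      obtain ⟨q, hq, he⟩ := helem t ht
      have hqp : q = p := by
        have : pairs[t].2 = (p : Int) := by rw [htg]; exact hxs
        rw [he] at this
        have h2 : (q : Int) = (p : Int) := this
        exact_mod_cast h2
      refine ⟨t, ?_, ?_⟩
      · rw [List.mem_range'_1]
        omega
      · rw [show pvPairGet pairs t = pairs[t]'ht from List.getD_eq_getElem pairs (' ', 0) ht, he]
        subst hqp
        dsimp only
        simp only [beq_self_eq_true, Bool.true_and, decide_eq_true_eq, hcnteq]
        exact h
  by_cases hc : 1 < word.count word[p]
  · rw [if_pos hc, if_pos (hiff.mpr hc)]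
  · simp [hc, (not_congr hiff).mpr hc]

-- ===== VERDICT (by name: the statement is the Claim_ definition above) =====
theorem find_repeating_symbols_spec : Claim_equal_find_repeating_symbols := by
  intro s _
  unfold Spec_find_repeating_symbols find_repeating_symbols find_repeating_symbols_alt
  dsimp only
  generalize PySem.Chars.lower s.toList = word
  by_cases hnd : ((PySem.Set.ofList word).length == word.length) = true
  · rw [if_pos hnd]
    have hnodup : word.Nodup := pvNodup_of_ofList_length word (beq_iff_eq.mp hnd)
    refine congrArg String.ofList ?_
    apply List.ext_getElem?
    intro i
    by_cases hi : i < word.length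
    · rw [pvB_char word i hi, List.getElem?_replicate, if_pos hi]
      have hcle : word.count word[i] ≤ 1 := List.nodup_iff_count_le_one.mp hnodup _
      rw [if_neg (by omega)]
    · rw [List.getElem?_eq_none (by rw [List.length_replicate]; omega),
        List.getElem?_eq_none (by
          rw [pvMarkLoop_len, List.length_replicate]
          omega)]
  · rw [if_neg hnd]
    refine congrArg String.ofList ?_
    apply List.ext_getElem?
    intro i
    by_cases hi : i < word.length
    · rw [pvA_char word i hi, pvB_char word i hi]
    · rw [List.getElem?_eq_none (by rw [pvA_len]; omega),
        List.getElem?_eq_none (by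
          rw [pvMarkLoop_len, List.length_replicate]
          omega)]
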